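-- pv_equiv track=rewrite | github.com/24kapooru/python1 | day7code.py | security_key
-- ===== SOURCE A (Python) =====
-- def security_key(number):
--     s=str(number)
--     frequency={}
--     for ch in s:
--         frequency[ch]=frequency.get(ch,0)+1
--     repeatednumber=0
--     for i in frequency.values():
--         if i>1:
--             repeatednumber+=(i-1)
--     return repeatednumber if repeatednumber>0 else -1
-- ===== SOURCE B (Python) =====
-- def security_key(number):
--     s = str(number)
--     extra = len(s) - len(set(s))
--     return extra if extra > 0 else -1
-- ===== Notes on version B (the rewrite author's own statement) =====
-- stated objective: simpler
-- what changed: Replaces the frequency-dict build and the summing loop over its values by the identity that the extra-repetition count equals len(str(number)) minus the number of distinct characters, computed as len(s) - len(set(s)).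
import Mathlib
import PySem

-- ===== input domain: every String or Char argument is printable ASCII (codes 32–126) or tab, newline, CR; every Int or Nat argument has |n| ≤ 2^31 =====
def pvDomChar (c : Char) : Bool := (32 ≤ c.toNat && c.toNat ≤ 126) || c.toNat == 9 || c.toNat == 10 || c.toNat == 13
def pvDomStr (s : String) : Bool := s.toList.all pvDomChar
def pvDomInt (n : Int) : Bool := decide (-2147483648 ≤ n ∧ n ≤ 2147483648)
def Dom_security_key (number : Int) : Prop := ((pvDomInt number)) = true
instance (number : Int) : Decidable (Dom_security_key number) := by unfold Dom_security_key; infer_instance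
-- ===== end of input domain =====

-- B replaces A's frequency-dict build and summing loop by the identity
-- extra = len(str(number)) - len(set(str(number))): simpler, one pass.


-- ===== PORT A =====
def security_key (number : Int) : Int :=
  let s := PySem.Int.toChars number
  let frequency := s.foldl (fun d ch => d.insert ch (d.getD ch 0 + 1)) PySem.Dict.empty
  let repeatednumber :=
    frequency.values.foldl (fun acc i => if i > 1 then acc + (i - 1) else acc) 0
  if repeatednumber > 0 then repeatednumber else -1

-- ===== PORT B =====
def security_key_alt (number : Int) : Int :=
  let s := PySem.Int.toChars number
  let extra : Int := (s.length : Int) - ((PySem.Set.ofList s).length : Int)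
  if extra > 0 then extra else -1

-- ===== PRECONDITION & SPEC =====
def Spec_security_key (number : Int) (out : Int) : Prop := out = security_key_alt number
instance (number : Int) (out : Int) : Decidable (Spec_security_key number out) := by unfold Spec_security_key; infer_instance

-- ===== CLAIM (what is proved, stated in full; the proofs are below) =====
def Claim_equal_security_key : Prop := ∀ (number : Int), Dom_security_key number → Spec_security_key number (security_key number)

-- ===== LEMMAS AND PROOFS =====

theorem pv_sum_map_sub_one (D : List Char) (f : Char → Int) :
    (D.map (fun k => f k - 1)).sum = (D.map f).sum - D.length := by
  induction D with
  | nil => simp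
  | cons x t ih => simp [ih]; ring

theorem pv_ofList_perm_dedup (cs : List Char) :
    (PySem.Set.ofList cs).Perm cs.dedup := by
  rw [List.perm_ext_iff_of_nodup (PySem.Set.nodup_ofList cs) cs.nodup_dedup]
  intro a
  simp [PySem.Set.mem_ofList, List.mem_dedup]

theorem pv_sum_counts (cs : List Char) :
    ((PySem.Set.ofList cs).map (fun k => (List.count k cs : Int))).sum = (cs.length : Int) := by
  have hperm : ((PySem.Set.ofList cs).map (fun k => (List.count k cs : Int))).Perm
      (cs.dedup.map (fun k => (List.count k cs : Int))) :=
    (pv_ofList_perm_dedup cs).map _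
  rw [hperm.sum_eq]
  have := List.sum_map_count_dedup_eq_length cs
  calc (cs.dedup.map (fun k => (List.count k cs : Int))).sum
      = ((cs.dedup.map (fun k => List.count k cs)).sum : Int) := by
        rw [Nat.cast_list_sum, List.map_map]; rfl
    _ = (cs.length : Int) := by rw [this]

theorem pv_loop_eq (cs : List Char) :
    ((cs.foldl (fun d ch => d.insert ch (d.getD ch 0 + 1)) PySem.Dict.empty).values).foldl
        (fun acc i => if i > 1 then acc + (i - 1) else acc) 0
      = (cs.length : Int) - ((PySem.Set.ofList cs).length : Int) := by
  rw [PySem.Dict.foldl_insert_getD_add_one_eq_counter]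
  have hvals : (PySem.Dict.counter cs).values
      = (PySem.Set.ofList cs).map (fun k => (List.count k cs : Int)) := by
    show (PySem.Dict.counter cs).items.map (·.2) = _
    rw [PySem.Dict.items_counter, List.map_map]
    simp
  rw [hvals]
  have hfun : (fun (acc i : Int) => if i > 1 then acc + (i - 1) else acc)
      = (fun acc i => acc + (if i > 1 then i - 1 else 0)) := by
    funext a i; split_ifs <;> simp
  rw [hfun, PySem.List.foldl_add, List.map_map]
  have hcong : (PySem.Set.ofList cs).map
        ((fun (i : Int) => if i > 1 then i - 1 else 0) ∘ (fun k => (List.count k cs : Int)))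
      = (PySem.Set.ofList cs).map (fun k => (List.count k cs : Int) - 1) := by
    apply List.map_congr_left
    intro k hk
    have hmem : k ∈ cs := (PySem.Set.mem_ofList cs k).mp hk
    have hpos : 1 ≤ List.count k cs := List.count_pos_iff.mpr hmem
    simp only [Function.comp_apply]
    by_cases h : ((List.count k cs : Int)) > 1
    · simp [h]
    · have h1 : List.count k cs = 1 := by omega
      simp [h1]
  rw [hcong, pv_sum_map_sub_one, pv_sum_counts]
  ring

-- ===== VERDICT (by name: the statement is the Claim_ definition above) =====
theorem security_key_spec : Claim_equal_security_key := by
  intro number _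
  unfold Spec_security_key security_key security_key_alt
  simp only [pv_loop_eq]
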